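-- pv_equiv track=rewrite | github.com/NayanaChandrika99/RLM_aiObservability | apps/demo_agent/fault_injector.py | _resolve_run_id_column
-- ===== SOURCE A (Python) =====
-- def _resolve_run_id_column(columns: list[str]) -> str | None:
--     preferred = [
--         "attributes.phase1.run_id",
--         "attributes.phase1",
--         "phase1.run_id",
--         "run_id",
--     ]
--     for name in preferred:
--         if name in columns:
--             return name
--     for name in columns:
--         if "phase1.run_id" in name:
--             return name
--     for name in columns:
--         if name.endswith("run_id"):
--             return name
--     return None
-- ===== SOURCE B (Python) =====
-- def _resolve_run_id_column(columns: list[str]) -> str | None: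
--     preferred = [
--         "attributes.phase1.run_id",
--         "attributes.phase1",
--         "phase1.run_id",
--         "run_id",
--     ]
--     best_rank = 6
--     best_name = None
--     for name in columns:
--         if name in preferred:
--             r = preferred.index(name)
--         elif "phase1.run_id" in name:
--             r = 4
--         elif name.endswith("run_id"):
--             r = 5
--         else:
--             r = 6
--         if r < best_rank:
--             best_rank, best_name = r, name
--     return best_name
-- ===== Notes on version B (the rewrite author's own statement) =====
-- stated objective: alternative
-- what changed: Replaced A's three sequential scans (preferred-list membership loop, substring loop, suffix loop) by one single pass over columns that ranks each column 0-5 and keeps the first column with the minimal rank.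
import Mathlib
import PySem

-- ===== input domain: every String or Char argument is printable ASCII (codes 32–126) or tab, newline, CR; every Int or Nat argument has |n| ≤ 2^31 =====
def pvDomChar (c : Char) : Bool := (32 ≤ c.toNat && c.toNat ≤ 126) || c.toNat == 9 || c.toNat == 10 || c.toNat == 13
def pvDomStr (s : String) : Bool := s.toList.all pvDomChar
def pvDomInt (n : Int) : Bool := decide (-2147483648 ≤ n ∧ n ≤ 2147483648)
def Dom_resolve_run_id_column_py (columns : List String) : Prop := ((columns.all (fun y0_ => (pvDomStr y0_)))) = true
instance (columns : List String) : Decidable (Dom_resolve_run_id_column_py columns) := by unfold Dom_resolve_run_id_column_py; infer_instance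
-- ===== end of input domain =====

-- B replaces A's three sequential scans by one pass that ranks each column 0-5 and keeps the first minimal-rank column (alternative decomposition, same cost).

-- ===== PORT A =====
def pvPreferred : List String :=
  ["attributes.phase1.run_id", "attributes.phase1", "phase1.run_id", "run_id"]

-- first loop: over the preferred list, membership test in columns
def pvLoopPref : List String → List String → Option String
  | [], _ => none
  | p :: ps, cols => if cols.contains p then some p else pvLoopPref ps cols

-- second loop: first column containing the substring "phase1.run_id"
def pvLoopSub : List String → Option String
  | [] => none
  | n :: ns => if PySem.Str.isIn "phase1.run_id" n then some n else pvLoopSub ns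

-- third loop: first column ending with "run_id"
def pvLoopEnd : List String → Option String
  | [] => none
  | n :: ns => if PySem.Str.endswith n "run_id" then some n else pvLoopEnd ns

def resolve_run_id_column_py (columns : List String) : Option String :=
  match pvLoopPref pvPreferred columns with
  | some n => some n
  | none =>
    match pvLoopSub columns with
    | some n => some n
    | none => pvLoopEnd columns

-- ===== PORT B =====
-- rank of a column: its index in preferred (0-3), else 4 for substring hit, 5 for suffix hit, 6 otherwise
def pvRank (name : String) : Nat :=
  match PySem.List.index? pvPreferred name with
  | some j => j
  | none =>
    if PySem.Str.isIn "phase1.run_id" name then 4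
    else if PySem.Str.endswith name "run_id" then 5
    else 6

def pvStep (acc : Nat × Option String) (name : String) : Nat × Option String :=
  let r := pvRank name
  if r < acc.1 then (r, some name) else acc

def resolve_run_id_column_py_alt (columns : List String) : Option String :=
  (columns.foldl pvStep ((6 : Nat), (none : Option String))).2

-- ===== PRECONDITION & SPEC =====
def Spec_resolve_run_id_column_py (columns : List String) (out : Option String) : Prop := out = resolve_run_id_column_py_alt columns
instance (columns : List String) (out : Option String) : Decidable (Spec_resolve_run_id_column_py columns out) := by unfold Spec_resolve_run_id_column_py; infer_instance

-- ===== CLAIM (what is proved, stated in full; the proofs are below) =====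
def Claim_equal_resolve_run_id_column_py : Prop := ∀ (columns : List String), Dom_resolve_run_id_column_py columns → Spec_resolve_run_id_column_py columns (resolve_run_id_column_py columns)

-- ===== LEMMAS AND PROOFS =====

-- minimal rank appearing in a list (6 if empty)
def pvMinRank : List String → Nat
  | [] => 6
  | n :: l => min (pvRank n) (pvMinRank l)

theorem pvMinRank_le_of_mem {l : List String} {n : String} (h : n ∈ l) :
    pvMinRank l ≤ pvRank n := by
  induction l with
  | nil => cases h
  | cons a t ih =>
    rcases List.mem_cons.mp h with rfl | h
    · simp [pvMinRank]
    · simp only [pvMinRank]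
      exact le_trans (min_le_right _ _) (ih h)

theorem pvMinRank_ge {l : List String} {k : Nat} (hk : k ≤ 6)
    (h : ∀ n ∈ l, k ≤ pvRank n) : k ≤ pvMinRank l := by
  induction l with
  | nil => simpa [pvMinRank]
  | cons a t ih =>
    simp only [pvMinRank, le_min_iff]
    exact ⟨h a (by simp), ih (fun n hn => h n (List.mem_cons_of_mem _ hn))⟩

theorem pvMinRank_le_six (l : List String) : pvMinRank l ≤ 6 := by
  induction l with
  | nil => simp [pvMinRank]
  | cons a t ih =>
    simp only [pvMinRank]
    exact le_trans (min_le_right _ _) ih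

-- explicit form of the rank function
theorem pvRank_eq (name : String) : pvRank name =
    if name = "attributes.phase1.run_id" then 0
    else if name = "attributes.phase1" then 1
    else if name = "phase1.run_id" then 2
    else if name = "run_id" then 3
    else if PySem.Str.isIn "phase1.run_id" name then 4
    else if PySem.Str.endswith name "run_id" then 5
    else 6 := by
  unfold pvRank pvPreferred
  by_cases h0 : name = "attributes.phase1.run_id"
  · subst h0; decide
  by_cases h1 : name = "attributes.phase1"
  · subst h1; decide
  by_cases h2 : name = "phase1.run_id"
  · subst h2; decide
  by_cases h3 : name = "run_id"
  · subst h3; decide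
  have : PySem.List.index? ["attributes.phase1.run_id", "attributes.phase1", "phase1.run_id", "run_id"] name = none := by
    rw [PySem.List.index?_eq_none_iff]
    simp only [List.mem_cons, List.not_mem_nil, or_false]
    tauto
  rw [this]
  simp [h0, h1, h2, h3]

theorem pvRank_le_six (name : String) : pvRank name ≤ 6 := by
  rw [pvRank_eq]; split_ifs <;> omega

-- characterization of the fold in port B
theorem pvFold_char (l : List String) : ∀ (b : Nat) (o : Option String), b ≤ 6 →
    l.foldl pvStep (b, o) =
      (min b (pvMinRank l),
       if pvMinRank l < b then l.find? (fun n => pvRank n == pvMinRank l) else o) := by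
  induction l with
  | nil => intro b o hb; simp [pvMinRank]; omega
  | cons a t ih =>
    intro b o hb
    simp only [List.foldl_cons, pvStep, pvMinRank, List.find?]
    by_cases h : pvRank a < b
    · simp only [h, if_pos]
      rw [ih _ _ (pvRank_le_six a)]
      by_cases h2 : pvMinRank t < pvRank a
      · have hmin : min (pvRank a) (pvMinRank t) = pvMinRank t := by omega
        have hne : (pvRank a == pvMinRank t) = false := by
          simp; omega
        have : min b (min (pvRank a) (pvMinRank t)) = min (pvRank a) (pvMinRank t) := by omega
        rw [this, hmin]
        simp [h2, hne]
        omega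
      · have hmin : min (pvRank a) (pvMinRank t) = pvRank a := by omega
        have heq : (pvRank a == pvRank a) = true := by simp
        have : min b (min (pvRank a) (pvMinRank t)) = min (pvRank a) (pvMinRank t) := by omega
        rw [this, hmin]
        simp [h2, h]
    · simp only [h, if_false]
      rw [ih _ _ hb]
      rw [not_lt] at h
      by_cases h2 : pvMinRank t < b
      · have hcond : min (pvRank a) (pvMinRank t) < b := by omega
        have hmin : min (pvRank a) (pvMinRank t) = pvMinRank t := by omega
        have hne : (pvRank a == min (pvRank a) (pvMinRank t)) = false := by
          simp [hmin]; omega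
        have : min b (min (pvRank a) (pvMinRank t)) = min b (pvMinRank t) := by omega
        rw [this, hmin] at *
        simp [hcond, h2, hne]
      · have hcond : ¬ min (pvRank a) (pvMinRank t) < b := by omega
        have : min b (min (pvRank a) (pvMinRank t)) = min b (pvMinRank t) := by omega
        rw [this]
        simp [hcond, h2]

theorem pvFind?_unique {l : List String} {p : String → Bool} {a : String}
    (hp : ∀ x, p x = true ↔ x = a) (ha : a ∈ l) : l.find? p = some a := by
  induction l with
  | nil => cases ha
  | cons x t ih =>
    by_cases hx : p x
    · have hxa : x = a := (hp x).mp hx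
      subst hxa
      simp [List.find?, hx]
    · have hne : x ≠ a := fun h => hx ((hp x).mpr h)
      simp only [List.find?, Bool.not_eq_true] at hx ⊢
      rw [hx]
      exact ih (by rcases List.mem_cons.mp ha with h | h; exact absurd h.symm hne; exact h)

theorem pvFind?_congr {l : List String} {p q : String → Bool}
    (h : ∀ x ∈ l, p x = q x) : l.find? p = l.find? q := by
  induction l with
  | nil => rfl
  | cons x t ih =>
    simp only [List.find?, h x (by simp)]
    cases q x
    · exact ih (fun y hy => h y (List.mem_cons_of_mem _ hy))
    · rfl

theorem pvLoopSub_eq (l : List String) :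
    pvLoopSub l = l.find? (fun n => PySem.Str.isIn "phase1.run_id" n) := by
  induction l with
  | nil => rfl
  | cons a t ih =>
    by_cases h : PySem.Str.isIn "phase1.run_id" a = true
    · simp only [pvLoopSub, h, if_true]
      rw [List.find?_cons_of_pos (by simpa using h)]
    · simp only [pvLoopSub, h, if_false]
      rw [List.find?_cons_of_neg (by simpa using h), ih]
      simp

theorem pvLoopEnd_eq (l : List String) :
    pvLoopEnd l = l.find? (fun n => PySem.Str.endswith n "run_id") := by
  induction l with
  | nil => rfl
  | cons a t ih =>
    by_cases h : PySem.Str.endswith a "run_id" = true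
    · simp only [pvLoopEnd, h, if_true]
      rw [List.find?_cons_of_pos (by simpa using h)]
    · simp only [pvLoopEnd, h, if_false]
      rw [List.find?_cons_of_neg (by simpa using h), ih]
      simp

-- B, rewritten through the fold characterization
theorem pvAlt_eq (cols : List String) :
    resolve_run_id_column_py_alt cols =
      if pvMinRank cols < 6 then cols.find? (fun n => pvRank n == pvMinRank cols) else none := by
  unfold resolve_run_id_column_py_alt
  rw [pvFold_char _ _ _ (le_refl 6)]

theorem pvRank0_iff (x : String) : pvRank x = 0 ↔ x = "attributes.phase1.run_id" := by
  rw [pvRank_eq]; split_ifs <;> simp_all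

theorem pvRank1_iff (x : String) : pvRank x = 1 ↔ x = "attributes.phase1" := by
  rw [pvRank_eq]; split_ifs <;> simp_all

theorem pvRank2_iff (x : String) : pvRank x = 2 ↔ x = "phase1.run_id" := by
  rw [pvRank_eq]; split_ifs <;> simp_all

theorem pvRank3_iff (x : String) : pvRank x = 3 ↔ x = "run_id" := by
  rw [pvRank_eq]; split_ifs <;> simp_all

-- when the preferred literal of rank j occurs in cols, B picks exactly it
theorem pvCasePref (cols : List String) (lit : String) (j : Nat) (hj6 : j < 6)
    (hiff : ∀ x, pvRank x = j ↔ x = lit)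
    (hmem : lit ∈ cols)
    (hlow : ∀ n ∈ cols, j ≤ pvRank n) :
    (if pvMinRank cols < 6 then cols.find? (fun n => pvRank n == pvMinRank cols) else none) = some lit := by
  have h1 : pvMinRank cols ≤ j := by
    have := pvMinRank_le_of_mem hmem
    rwa [(hiff lit).mpr rfl] at this
  have h2 : j ≤ pvMinRank cols := pvMinRank_ge (by omega) hlow
  have hmr : pvMinRank cols = j := le_antisymm h1 h2
  rw [hmr, if_pos hj6]
  exact pvFind?_unique (fun x => by simpa using hiff x) hmem

theorem pvMain (cols : List String) :
    resolve_run_id_column_py cols = resolve_run_id_column_py_alt cols := by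
  rw [pvAlt_eq]
  unfold resolve_run_id_column_py pvPreferred
  simp only [pvLoopPref]
  by_cases c0 : cols.contains "attributes.phase1.run_id" = true
  · rw [if_pos c0]
    exact (pvCasePref cols _ 0 (by omega) pvRank0_iff (by simpa using c0)
      (fun n _ => Nat.zero_le _)).symm
  rw [if_neg c0]
  by_cases c1 : cols.contains "attributes.phase1" = true
  · rw [if_pos c1]
    refine (pvCasePref cols _ 1 (by omega) pvRank1_iff (by simpa using c1) ?_).symm
    intro n hn
    have h0 : pvRank n ≠ 0 := fun h => c0 (by
      simp only [List.contains_eq_mem, decide_eq_true_eq]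
      exact (pvRank0_iff n).mp h ▸ hn)
    omega
  rw [if_neg c1]
  by_cases c2 : cols.contains "phase1.run_id" = true
  · rw [if_pos c2]
    refine (pvCasePref cols _ 2 (by omega) pvRank2_iff (by simpa using c2) ?_).symm
    intro n hn
    have h0 : pvRank n ≠ 0 := fun h => c0 (by
      simp only [List.contains_eq_mem, decide_eq_true_eq]
      exact (pvRank0_iff n).mp h ▸ hn)
    have h1 : pvRank n ≠ 1 := fun h => c1 (by
      simp only [List.contains_eq_mem, decide_eq_true_eq]
      exact (pvRank1_iff n).mp h ▸ hn)
    omega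
  rw [if_neg c2]
  by_cases c3 : cols.contains "run_id" = true
  · rw [if_pos c3]
    refine (pvCasePref cols _ 3 (by omega) pvRank3_iff (by simpa using c3) ?_).symm
    intro n hn
    have h0 : pvRank n ≠ 0 := fun h => c0 (by
      simp only [List.contains_eq_mem, decide_eq_true_eq]
      exact (pvRank0_iff n).mp h ▸ hn)
    have h1 : pvRank n ≠ 1 := fun h => c1 (by
      simp only [List.contains_eq_mem, decide_eq_true_eq]
      exact (pvRank1_iff n).mp h ▸ hn)
    have h2 : pvRank n ≠ 2 := fun h => c2 (by
      simp only [List.contains_eq_mem, decide_eq_true_eq]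
      exact (pvRank2_iff n).mp h ▸ hn)
    omega
  rw [if_neg c3]
  -- no preferred literal occurs: every column has rank at least 4
  have hnp : ∀ n ∈ cols, 4 ≤ pvRank n := by
    intro n hn
    have h0 : pvRank n ≠ 0 := fun h => c0 (by
      simp only [List.contains_eq_mem, decide_eq_true_eq]
      exact (pvRank0_iff n).mp h ▸ hn)
    have h1 : pvRank n ≠ 1 := fun h => c1 (by
      simp only [List.contains_eq_mem, decide_eq_true_eq]
      exact (pvRank1_iff n).mp h ▸ hn)
    have h2 : pvRank n ≠ 2 := fun h => c2 (by
      simp only [List.contains_eq_mem, decide_eq_true_eq]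
      exact (pvRank2_iff n).mp h ▸ hn)
    have h3 : pvRank n ≠ 3 := fun h => c3 (by
      simp only [List.contains_eq_mem, decide_eq_true_eq]
      exact (pvRank3_iff n).mp h ▸ hn)
    omega
  rw [pvLoopSub_eq]
  cases hS : cols.find? (fun n => PySem.Str.isIn "phase1.run_id" n) with
  | some sname =>
    have hmemS : sname ∈ cols := List.mem_of_find?_eq_some hS
    have hinS : PySem.Str.isIn "phase1.run_id" sname = true := List.find?_some hS
    have hrS : pvRank sname = 4 := by
      have h4 := hnp sname hmemS
      rw [pvRank_eq] at h4 ⊢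
      split_ifs at h4 ⊢ <;> simp_all
    have hmr : pvMinRank cols = 4 := by
      have h1 : pvMinRank cols ≤ 4 := hrS ▸ pvMinRank_le_of_mem hmemS
      have h2 : 4 ≤ pvMinRank cols := pvMinRank_ge (by omega) hnp
      omega
    rw [hmr, if_pos (by omega)]
    rw [pvFind?_congr (q := fun n => PySem.Str.isIn "phase1.run_id" n) ?_, hS]
    intro x hx
    have h4 := hnp x hx
    rw [pvRank_eq] at h4 ⊢
    split_ifs at h4 ⊢ <;> simp_all
  | none =>
    have hnoS : ∀ x ∈ cols, PySem.Str.isIn "phase1.run_id" x = false := by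
      intro x hx
      have := List.find?_eq_none.mp hS x hx
      simpa using this
    have hnp5 : ∀ n ∈ cols, 5 ≤ pvRank n := by
      intro n hn
      have h4 := hnp n hn
      have hni := hnoS n hn
      rw [pvRank_eq] at h4 ⊢
      split_ifs at h4 ⊢ <;> simp_all
    rw [pvLoopEnd_eq]
    cases hE : cols.find? (fun n => PySem.Str.endswith n "run_id") with
    | some en =>
      have hmemE : en ∈ cols := List.mem_of_find?_eq_some hE
      have hendE : PySem.Str.endswith en "run_id" = true := by
        have := List.find?_some (p := fun n => PySem.Str.endswith n "run_id") hE
        simpa using this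
      have hrE : pvRank en = 5 := by
        have h5 := hnp5 en hmemE
        rw [pvRank_eq] at h5 ⊢
        split_ifs at h5 ⊢ <;> simp_all
      have hmr : pvMinRank cols = 5 := by
        have h1 : pvMinRank cols ≤ 5 := hrE ▸ pvMinRank_le_of_mem hmemE
        have h2 : 5 ≤ pvMinRank cols := pvMinRank_ge (by omega) hnp5
        omega
      rw [hmr, if_pos (by omega)]
      rw [pvFind?_congr (q := fun n => PySem.Str.endswith n "run_id") ?_, hE]
      intro x hx
      have h5 := hnp5 x hx
      rw [pvRank_eq] at h5 ⊢
      split_ifs at h5 ⊢ <;> simp_all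
    | none =>
      have hnoE : ∀ x ∈ cols, PySem.Str.endswith x "run_id" = false := by
        intro x hx
        have := List.find?_eq_none.mp hE x hx
        simpa using this
      have hnp6 : ∀ n ∈ cols, 6 ≤ pvRank n := by
        intro n hn
        have h5 := hnp5 n hn
        have hne := hnoE n hn
        rw [pvRank_eq] at h5 ⊢
        split_ifs at h5 ⊢ <;> simp_all
      have hmr : pvMinRank cols = 6 :=
        le_antisymm (pvMinRank_le_six cols) (pvMinRank_ge (by omega) hnp6)
      rw [hmr, if_neg (by omega)]

-- ===== VERDICT (by name: the statement is the Claim_ definition above) =====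
theorem resolve_run_id_column_py_spec : Claim_equal_resolve_run_id_column_py := by
  intro columns _
  unfold Spec_resolve_run_id_column_py
  exact pvMain columns
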